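-- pv_equiv track=rewrite | github.com/mitmproxy/mitmproxy | netlib/http/cookies.py | _read_quoted_string
-- ===== SOURCE A (Python) =====
-- def _read_quoted_string(s, start):
--     """
--         start: offset to the first quote of the string to be read
--
--         A sort of loose super-set of the various quoted string specifications.
--
--         RFC6265 disallows backslashes or double quotes within quoted strings.
--         Prior RFCs use backslashes to escape. This leaves us free to apply
--         backslash escaping by default and be compatible with everything.
--     """
--     escaping = False
--     ret = []
--     # Skip the first quote
--     i = start  # initialize in case the loop doesn't run.
--     for i in range(start + 1, len(s)):
--         if escaping:
--             ret.append(s[i])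
--             escaping = False
--         elif s[i] == '"':
--             break
--         elif s[i] == "\\":
--             escaping = True
--         else:
--             ret.append(s[i])
--     return "".join(ret), i + 1
-- ===== SOURCE B (Python) =====
-- def _read_quoted_string(s, start):
--     # Delimiter-scanning: jump between the next quote/backslash with str.find
--     # instead of examining every character.
--     t = s[start + 1:]
--     parts = []
--     consumed = 0
--     while True:
--         q = t.find('"')
--         b = t.find('\\')
--         if q != -1 and (b == -1 or q < b):
--             return "".join(parts) + t[:q], start + 1 + consumed + q + 1
--         if b == -1:
--             return "".join(parts) + t, start + 1 + consumed + len(t)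
--         esc = t[b + 1:b + 2]
--         parts.append(t[:b] + esc)
--         consumed += b + 1 + len(esc)
--         t = t[b + 2:]
-- ===== Notes on version B (the rewrite author's own statement) =====
-- stated objective: faster
-- what changed: A walks the string one character at a time with an 'escaping' state flag; B jumps between special characters with str.find('"')/str.find('\\') on the suffix after the opening quote, copying whole literal slices, so the per-character work moves into C-level find/slice.
-- outside the precondition, e.g. on _read_quoted_string('abc', -3): A returns ('bcabc', 3), B returns ('bc', 0)
import Mathlib
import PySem

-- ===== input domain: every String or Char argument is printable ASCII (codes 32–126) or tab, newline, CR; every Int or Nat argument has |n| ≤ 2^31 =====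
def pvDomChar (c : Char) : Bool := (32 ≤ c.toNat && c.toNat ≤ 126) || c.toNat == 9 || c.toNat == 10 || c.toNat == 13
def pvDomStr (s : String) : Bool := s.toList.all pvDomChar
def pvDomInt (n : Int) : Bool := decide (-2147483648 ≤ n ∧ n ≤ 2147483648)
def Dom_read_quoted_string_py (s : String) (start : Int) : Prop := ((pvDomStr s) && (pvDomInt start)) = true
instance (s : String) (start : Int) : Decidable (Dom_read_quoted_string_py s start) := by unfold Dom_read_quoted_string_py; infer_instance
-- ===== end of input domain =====

-- B replaces A's char-by-char state machine by delimiter scanning with str.find,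
-- copying whole literal slices between special characters (measured faster by the
-- timing run).  Neither program mutates its arguments.

-- ===== PORT A =====
-- the 'for i in range(start+1, len(s))' loop: state = (escaping, ret, i); break returns early
def readRetLoop (chars : List Char) (idxs : List Int) (escaping : Bool)
    (ret : List Char) (i : Int) : List Char × Int :=
  match idxs with
  | [] => (ret, i)
  | j :: rest =>
    match PySem.List.pyGet? chars j with
    | none => (ret, j)          -- Python raises IndexError here (outside Pre_)
    | some c =>
      if escaping then readRetLoop chars rest false (ret ++ [c]) j
      else if c = '"' then (ret, j)                       -- break
      else if c = '\\' then readRetLoop chars rest true ret j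
      else readRetLoop chars rest false (ret ++ [c]) j

def read_quoted_string_py (s : String) (start : Int) : String × Int :=
  let chars := s.toList
  let r := readRetLoop chars (PySem.List.pyRange (start + 1) chars.length) false [] start
  (String.ofList r.1, r.2 + 1)

-- ===== PORT B =====
-- termination fact for scanLoop: the suffix after the found backslash is shorter
lemma pv_slice_after_bs_lt (t : List Char) (h : PySem.Chars.find t ['\\'] ≠ -1) :
    (PySem.List.slice t (some (PySem.Chars.find t ['\\'] + 2)) none).length < t.length := by
  have hge : 0 ≤ PySem.Chars.find t ['\\'] := by
    have := PySem.Chars.neg_one_le_find t ['\\']; omega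
  have hne : t ≠ [] := by
    intro he; subst he; exact h rfl
  rw [PySem.List.slice_from t (by omega)]
  have : t.length ≠ 0 := by simpa using hne
  simp only [List.length_drop]
  omega

-- the 'while True' loop of B: jump to the nearer of the next '"' / '\'
def scanLoop (t : List Char) (parts : List Char) (consumed : Int) : List Char × Int :=
  if _h1 : PySem.Chars.find t ['"'] ≠ -1 ∧
      (PySem.Chars.find t ['\\'] = -1 ∨ PySem.Chars.find t ['"'] < PySem.Chars.find t ['\\']) then
    (parts ++ PySem.List.slice t none (some (PySem.Chars.find t ['"'])),
     consumed + PySem.Chars.find t ['"'] + 1)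
  else if _h2 : PySem.Chars.find t ['\\'] = -1 then
    (parts ++ t, consumed + t.length)
  else
    scanLoop (PySem.List.slice t (some (PySem.Chars.find t ['\\'] + 2)) none)
      (parts ++ PySem.List.slice t none (some (PySem.Chars.find t ['\\']))
             ++ PySem.List.slice t (some (PySem.Chars.find t ['\\'] + 1))
                                   (some (PySem.Chars.find t ['\\'] + 2)))
      (consumed + PySem.Chars.find t ['\\'] + 1
        + (PySem.List.slice t (some (PySem.Chars.find t ['\\'] + 1))
                              (some (PySem.Chars.find t ['\\'] + 2))).length)
termination_by t.length
decreasing_by exact pv_slice_after_bs_lt t _h2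

def read_quoted_string_py_alt (s : String) (start : Int) : String × Int :=
  let t := PySem.List.slice s.toList (some (start + 1)) none
  let r := scanLoop t [] 0
  (String.ofList r.1, start + 1 + r.2)

-- ===== PRECONDITION & SPEC =====
-- Pre_ restricts to the natural domain 0 ≤ start (start is the offset of the opening
-- quote): for negative start A indexes with Python's negative-index wraparound (re-reading
-- characters or raising IndexError), an accident of s[i] no caller relies on.
def Pre_read_quoted_string_py (s : String) (start : Int) : Prop := 0 ≤ start
instance (s : String) (start : Int) : Decidable (Pre_read_quoted_string_py s start) := by
  unfold Pre_read_quoted_string_py; infer_instance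

def pvWitness_read_quoted_string_py : String × Int := ("\"a\\\"b\" c", 0)

def Spec_read_quoted_string_py (s : String) (start : Int) (out : String × Int) : Prop := out = read_quoted_string_py_alt s start
instance (s : String) (start : Int) (out : String × Int) : Decidable (Spec_read_quoted_string_py s start out) := by unfold Spec_read_quoted_string_py; infer_instance

-- ===== CLAIM (what is proved, stated in full; the proofs are below) =====
def Claim_equal_read_quoted_string_py : Prop := ∀ (s : String) (start : Int), Dom_read_quoted_string_py s start → Pre_read_quoted_string_py s start → Spec_read_quoted_string_py s start (read_quoted_string_py s start)

-- ===== LEMMAS AND PROOFS =====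

lemma pair_eq {α β : Type} {a c : α} {b d : β} (h1 : a = c) (h2 : b = d) : (a, b) = (c, d) := by
  rw [h1, h2]

-- reference scan: what both programs compute on the character list after the opening
-- quote; returns (unescaped body, number of positions consumed incl. the closing quote)
def refScan : List Char → List Char × Int
  | [] => ([], 0)
  | c :: rest =>
    if c = '"' then ([], 1)
    else if c = '\\' then
      match rest with
      | [] => ([], 1)
      | d :: rest' => (d :: (refScan rest').1, (refScan rest').2 + 2)
    else (c :: (refScan rest).1, (refScan rest).2 + 1)

lemma refScan_nil : refScan [] = ([], 0) := rfl
lemma refScan_cons_quote (rest : List Char) : refScan ('"' :: rest) = ([], 1) := by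
  conv_lhs => rw [refScan.eq_def]
  simp
lemma refScan_bs_nil : refScan ['\\'] = ([], 1) := rfl
lemma refScan_bs_cons (d : Char) (rest' : List Char) :
    refScan ('\\' :: d :: rest') = (d :: (refScan rest').1, (refScan rest').2 + 2) := rfl
lemma refScan_other (c : Char) (rest : List Char) (h1 : c ≠ '"') (h2 : c ≠ '\\') :
    refScan (c :: rest) = (c :: (refScan rest).1, (refScan rest).2 + 1) := by
  conv_lhs => rw [refScan.eq_def]
  simp only [if_neg h1, if_neg h2]

lemma pyRange_nil (a b : Int) (h : b ≤ a) : PySem.List.pyRange a b = [] := by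
  have : ¬ (a < b) := by omega
  simp [PySem.List.pyRange, this]

-- find.go searches from index k: one unfolding step for a single-character needle
lemma go_cons (c : Char) (rest : List Char) (ch : Char) (k : Nat) :
    PySem.Chars.find.go [ch] (c :: rest) k =
      if c = ch then (k : Int) else PySem.Chars.find.go [ch] rest (k + 1) := by
  rw [PySem.Chars.find.go]
  by_cases h : c = ch <;> simp [List.isPrefixOf, h]
  · intro h'; exact absurd h'.symm h

lemma go_succ (ch : Char) (t : List Char) : ∀ k : Nat,
    PySem.Chars.find.go [ch] t (k + 1) =
      if PySem.Chars.find.go [ch] t k = -1 then -1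
      else PySem.Chars.find.go [ch] t k + 1 := by
  induction t with
  | nil => intro k; rw [PySem.Chars.find.go, PySem.Chars.find.go]; simp
  | cons c rest ih =>
    intro k
    rw [go_cons, go_cons]
    by_cases h : c = ch
    · simp [h]
    · simp only [h, if_false]
      exact ih (k + 1)

lemma find_cons_single (c : Char) (rest : List Char) (ch : Char) :
    PySem.Chars.find (c :: rest) [ch] =
      if c = ch then 0
      else if PySem.Chars.find rest [ch] = -1 then -1
      else PySem.Chars.find rest [ch] + 1 := by
  show PySem.Chars.find.go [ch] (c :: rest) 0 = _
  rw [go_cons]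
  by_cases h : c = ch
  · simp [h]
  · simp only [h, if_false]
    exact go_succ ch rest 0

lemma find_nil_single (ch : Char) : PySem.Chars.find [] [ch] = -1 := rfl

-- chunk characterisations of refScan in terms of the two find results
lemma refScan_quote : ∀ t : List Char,
    PySem.Chars.find t ['"'] ≠ -1 →
    (PySem.Chars.find t ['\\'] = -1 ∨ PySem.Chars.find t ['"'] < PySem.Chars.find t ['\\']) →
    refScan t = (t.take (PySem.Chars.find t ['"']).toNat, PySem.Chars.find t ['"'] + 1) := by
  intro t
  induction t with
  | nil => intro h _; exact absurd (find_nil_single '"') h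
  | cons c rest ih =>
    intro hq hlt
    by_cases hcq : c = '"'
    · subst hcq
      rw [find_cons_single '"' rest '"']
      simp [refScan_cons_quote]
    · by_cases hcb : c = '\\'
      · exfalso
        subst hcb
        have hb0 : PySem.Chars.find ('\\' :: rest) ['\\'] = 0 := by
          rw [find_cons_single]; simp
        have hqv : PySem.Chars.find ('\\' :: rest) ['"']
            = if PySem.Chars.find rest ['"'] = -1 then -1 else PySem.Chars.find rest ['"'] + 1 := by
          rw [find_cons_single]; simp
        rw [hqv] at hq
        rw [hqv, hb0] at hlt
        have hqr : PySem.Chars.find rest ['"'] ≠ -1 := by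
          intro h; simp [h] at hq
        have hge : -1 ≤ PySem.Chars.find rest ['"'] := PySem.Chars.neg_one_le_find rest ['"']
        simp only [if_neg hqr] at hlt
        rcases hlt with h | h
        · omega
        · omega
      · rw [find_cons_single c rest '"'] at hq ⊢
        rw [find_cons_single c rest '"', find_cons_single c rest '\\'] at hlt
        simp only [if_neg hcq] at hq hlt ⊢
        simp only [if_neg hcb] at hlt
        have hqr : PySem.Chars.find rest ['"'] ≠ -1 := by
          intro h; simp [h] at hq
        have hge : -1 ≤ PySem.Chars.find rest ['"'] := PySem.Chars.neg_one_le_find rest ['"']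
        have hgeb : -1 ≤ PySem.Chars.find rest ['\\'] := PySem.Chars.neg_one_le_find rest ['\\']
        simp only [if_neg hqr] at hlt ⊢
        have hlt' : PySem.Chars.find rest ['\\'] = -1 ∨
            PySem.Chars.find rest ['"'] < PySem.Chars.find rest ['\\'] := by
          by_cases hbr : PySem.Chars.find rest ['\\'] = -1
          · exact Or.inl hbr
          · right
            simp only [if_neg hbr] at hlt
            rcases hlt with h | h
            · omega
            · omega
        rw [refScan_other c rest hcq hcb, ih hqr hlt']
        exact pair_eq
          (by rw [show (PySem.Chars.find rest ['"'] + 1).toNat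
                = (PySem.Chars.find rest ['"']).toNat + 1 by omega, List.take_succ_cons])
          (by ring)

lemma refScan_none : ∀ t : List Char,
    PySem.Chars.find t ['"'] = -1 → PySem.Chars.find t ['\\'] = -1 →
    refScan t = (t, (t.length : Int)) := by
  intro t
  induction t with
  | nil => intro _ _; simp [refScan_nil]
  | cons c rest ih =>
    intro hq hb
    rw [find_cons_single c rest '"'] at hq
    rw [find_cons_single c rest '\\'] at hb
    have hge : -1 ≤ PySem.Chars.find rest ['"'] := PySem.Chars.neg_one_le_find rest ['"']
    have hgeb : -1 ≤ PySem.Chars.find rest ['\\'] := PySem.Chars.neg_one_le_find rest ['\\']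
    have hcq : c ≠ '"' := by intro h; simp [h] at hq
    have hcb : c ≠ '\\' := by intro h; simp [h] at hb
    simp only [if_neg hcq] at hq
    simp only [if_neg hcb] at hb
    have hq' : PySem.Chars.find rest ['"'] = -1 := by
      by_cases h : PySem.Chars.find rest ['"'] = -1
      · exact h
      · simp only [if_neg h] at hq; omega
    have hb' : PySem.Chars.find rest ['\\'] = -1 := by
      by_cases h : PySem.Chars.find rest ['\\'] = -1
      · exact h
      · simp only [if_neg h] at hb; omega
    rw [refScan_other c rest hcq hcb, ih hq' hb']
    exact pair_eq rfl (by simp only [List.length_cons]; push_cast; ring)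

lemma refScan_bs : ∀ t : List Char,
    PySem.Chars.find t ['\\'] ≠ -1 →
    ¬ (PySem.Chars.find t ['"'] ≠ -1 ∧
        (PySem.Chars.find t ['\\'] = -1 ∨ PySem.Chars.find t ['"'] < PySem.Chars.find t ['\\'])) →
    refScan t = ((t.take (PySem.Chars.find t ['\\']).toNat)
                  ++ (t.drop ((PySem.Chars.find t ['\\']).toNat + 1)).take 1
                  ++ (refScan (t.drop ((PySem.Chars.find t ['\\']).toNat + 2))).1,
                 PySem.Chars.find t ['\\'] + 1
                  + ((t.drop ((PySem.Chars.find t ['\\']).toNat + 1)).take 1).length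
                  + (refScan (t.drop ((PySem.Chars.find t ['\\']).toNat + 2))).2) := by
  intro t
  induction t with
  | nil => intro h _; exact absurd (find_nil_single '\\') h
  | cons c rest ih =>
    intro hb h2
    have hgeq : -1 ≤ PySem.Chars.find rest ['"'] := PySem.Chars.neg_one_le_find rest ['"']
    have hgeb : -1 ≤ PySem.Chars.find rest ['\\'] := PySem.Chars.neg_one_le_find rest ['\\']
    by_cases hcq : c = '"'
    · exfalso
      subst hcq
      apply h2
      have hq0 : PySem.Chars.find ('"' :: rest) ['"'] = 0 := by
        rw [find_cons_single]; simp
      have hbv : PySem.Chars.find ('"' :: rest) ['\\']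
          = if PySem.Chars.find rest ['\\'] = -1 then -1 else PySem.Chars.find rest ['\\'] + 1 := by
        rw [find_cons_single]; simp
      rw [hbv] at hb
      rw [hq0, hbv]
      have hbr : PySem.Chars.find rest ['\\'] ≠ -1 := by
        intro h; simp [h] at hb
      refine ⟨by omega, Or.inr ?_⟩
      simp only [if_neg hbr]
      omega
    · by_cases hcb : c = '\\'
      · subst hcb
        have hb0 : PySem.Chars.find ('\\' :: rest) ['\\'] = 0 := by
          rw [find_cons_single]; simp
        rw [hb0]
        cases rest with
        | nil => simp [refScan_bs_nil, refScan_nil]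
        | cons d rest' =>
          rw [refScan_bs_cons]
          simp only [Int.toNat_zero, List.take_zero, Nat.zero_add, List.drop_succ_cons,
            List.drop_zero, List.take_succ_cons, List.nil_append]
          exact pair_eq rfl (by simp only [List.length_cons, List.length_nil]; push_cast; ring)
      · have hb' : PySem.Chars.find rest ['\\'] ≠ -1 := by
          intro h
          rw [find_cons_single c rest '\\'] at hb
          simp [hcb, h] at hb
        have hbe : PySem.Chars.find (c :: rest) ['\\'] = PySem.Chars.find rest ['\\'] + 1 := by
          rw [find_cons_single]
          simp [hcb, hb']
        have h2' : ¬ (PySem.Chars.find rest ['"'] ≠ -1 ∧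
            (PySem.Chars.find rest ['\\'] = -1 ∨
              PySem.Chars.find rest ['"'] < PySem.Chars.find rest ['\\'])) := by
          rintro ⟨hq', hor⟩
          apply h2
          rw [find_cons_single c rest '"', hbe]
          simp only [if_neg hcq, if_neg hq']
          refine ⟨by omega, Or.inr ?_⟩
          rcases hor with h | h
          · exact absurd h hb'
          · omega
        rw [hbe, refScan_other c rest hcq hcb, ih hb' h2']
        rw [show (PySem.Chars.find rest ['\\'] + 1).toNat
            = (PySem.Chars.find rest ['\\']).toNat + 1 by omega]
        simp only [List.take_succ_cons, List.drop_succ_cons]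
        exact pair_eq (by simp [List.append_assoc]) (by ring)

lemma scanLoop_eq : ∀ (n : Nat) (t : List Char), t.length ≤ n → ∀ (parts : List Char) (consumed : Int),
    scanLoop t parts consumed = (parts ++ (refScan t).1, consumed + (refScan t).2) := by
  intro n
  induction n with
  | zero =>
    intro t ht parts consumed
    have : t = [] := List.eq_nil_of_length_eq_zero (by omega)
    subst this
    rw [scanLoop]
    simp [find_nil_single, refScan_nil]
  | succ n ih =>
    intro t ht parts consumed
    rw [scanLoop]
    split_ifs with h1 h2
    · rw [refScan_quote t h1.1 h1.2]
      have hge : 0 ≤ PySem.Chars.find t ['"'] := by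
        have := PySem.Chars.neg_one_le_find t ['"']; omega
      rw [PySem.List.slice_to t hge]
      exact pair_eq rfl (by ring)
    · have hq : PySem.Chars.find t ['"'] = -1 := by
        by_cases h : PySem.Chars.find t ['"'] = -1
        · exact h
        · exact absurd ⟨h, Or.inl h2⟩ h1
      rw [refScan_none t hq h2]
    · have hgeb : 0 ≤ PySem.Chars.find t ['\\'] := by
        have := PySem.Chars.neg_one_le_find t ['\\']; omega
      have hlen : (PySem.List.slice t (some (PySem.Chars.find t ['\\'] + 2)) none).length < t.length :=
        pv_slice_after_bs_lt t h2
      rw [ih (PySem.List.slice t (some (PySem.Chars.find t ['\\'] + 2)) none) (by omega)]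
      rw [refScan_bs t h2 h1]
      have e1 : PySem.List.slice t none (some (PySem.Chars.find t ['\\']))
          = t.take (PySem.Chars.find t ['\\']).toNat := PySem.List.slice_to t hgeb
      have e2 : PySem.List.slice t (some (PySem.Chars.find t ['\\'] + 1))
            (some (PySem.Chars.find t ['\\'] + 2))
          = (t.drop ((PySem.Chars.find t ['\\']).toNat + 1)).take 1 := by
        rw [PySem.List.slice_toNat t (by omega) (by omega)]
        have h1' : (PySem.Chars.find t ['\\'] + 1).toNat
            = (PySem.Chars.find t ['\\']).toNat + 1 := by omega
        have h2' : (PySem.Chars.find t ['\\'] + 2).toNat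
            = (PySem.Chars.find t ['\\']).toNat + 2 := by omega
        rw [h1', h2', show (PySem.Chars.find t ['\\']).toNat + 2
            - ((PySem.Chars.find t ['\\']).toNat + 1) = 1 from by omega]
      have e3 : PySem.List.slice t (some (PySem.Chars.find t ['\\'] + 2)) none
          = t.drop ((PySem.Chars.find t ['\\']).toNat + 2) := by
        rw [PySem.List.slice_from t (by omega)]
        congr 1
        omega
      rw [e1, e2, e3]
      exact pair_eq (by simp [List.append_assoc]) (by push_cast; ring)

lemma aLoop_eq (chars : List Char) : ∀ (n j : Nat), chars.length - j ≤ n → ∀ acc : List Char,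
    readRetLoop chars (PySem.List.pyRange (j : Int) chars.length) false acc ((j : Int) - 1)
      = (acc ++ (refScan (chars.drop j)).1, ((j : Int) - 1) + (refScan (chars.drop j)).2) := by
  intro n
  induction n with
  | zero =>
    intro j hj acc
    have hge : chars.length ≤ j := by omega
    rw [pyRange_nil _ _ (by exact_mod_cast hge)]
    rw [List.drop_of_length_le hge]
    simp [readRetLoop, refScan_nil]
  | succ n ih =>
    intro j hj acc
    by_cases hlt : j < chars.length
    · rw [PySem.List.pyRange_one_cons (by exact_mod_cast hlt)]
      have hdrop := List.drop_eq_getElem_cons hlt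
      have hget : PySem.List.pyGet? chars (j : Int) = some chars[j] := by
        rw [PySem.List.pyGet?_natCast]
        exact List.getElem?_eq_getElem hlt
      simp only [readRetLoop, hget, Bool.false_eq_true, if_false]
      by_cases hq : chars[j] = '"'
      · simp only [hq]
        rw [hdrop, hq, refScan_cons_quote]
        exact pair_eq (by first | rfl | simp) (by first | rfl | ring)
      · by_cases hbs : chars[j] = '\\'
        · simp only [hbs]
          by_cases hlt2 : j + 1 < chars.length
          · rw [show (j : Int) + 1 = ((j + 1 : Nat) : Int) by push_cast; ring,
              PySem.List.pyRange_one_cons (by exact_mod_cast hlt2)]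
            have hget2 : PySem.List.pyGet? chars ((j + 1 : Nat) : Int) = some chars[j + 1] := by
              rw [PySem.List.pyGet?_natCast]
              exact List.getElem?_eq_getElem hlt2
            simp only [readRetLoop, hget2]
            rw [show ((j + 1 : Nat) : Int) + 1 = ((j + 2 : Nat) : Int) by push_cast; ring,
              show ((j + 1 : Nat) : Int) = ((j + 2 : Nat) : Int) - 1 by push_cast; ring,
              ih (j + 2) (by omega)]
            rw [hdrop, List.drop_eq_getElem_cons hlt2, hbs]
            rw [show chars.drop (j + 1 + 1) = chars.drop (j + 2) by norm_num]
            rw [refScan_bs_cons]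
            exact pair_eq (by first | rfl | simp) (by first | rfl | (dsimp only; push_cast; ring))
          · have hge2 : chars.length ≤ j + 1 := by omega
            rw [show (j : Int) + 1 = ((j + 1 : Nat) : Int) by push_cast; ring,
              pyRange_nil _ _ (by exact_mod_cast hge2)]
            rw [hdrop, List.drop_of_length_le hge2, hbs]
            simp only [readRetLoop, refScan_bs_nil]
            exact pair_eq (by first | rfl | simp) (by first | rfl | ring)
        · simp only [if_neg hq, if_neg hbs]
          rw [show (j : Int) = ((j + 1 : Nat) : Int) - 1 by push_cast; ring]
          rw [show ((j + 1 : Nat) : Int) - 1 + 1 = ((j + 1 : Nat) : Int) by ring]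
          rw [ih (j + 1) (by omega)]
          rw [hdrop, refScan_other chars[j] (chars.drop (j + 1)) hq hbs]
          exact pair_eq (by first | rfl | simp) (by first | rfl | (dsimp only; push_cast; ring))
    · have hge : chars.length ≤ j := by omega
      rw [pyRange_nil _ _ (by exact_mod_cast hge)]
      rw [List.drop_of_length_le hge]
      simp [readRetLoop, refScan_nil]

-- ===== VERDICT (by name: the statement is the Claim_ definition above) =====
theorem read_quoted_string_py_spec : Claim_equal_read_quoted_string_py := by
  intro s start _hdom hpre
  have hpre' : 0 ≤ start := hpre
  unfold Spec_read_quoted_string_py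
  unfold read_quoted_string_py read_quoted_string_py_alt
  set chars := s.toList with hc
  obtain ⟨j, hj, -⟩ : ∃ j : Nat, start = (j : Int) - 1 ∧ True := ⟨(start + 1).toNat, by omega, trivial⟩
  simp only [hj, show (j : Int) - 1 + 1 = (j : Int) by ring]
  have hslice : PySem.List.slice chars (some (j : Int)) none = chars.drop j := by
    rw [PySem.List.slice_from chars (by omega)]
    simp
  rw [hslice, scanLoop_eq (chars.drop j).length _ le_rfl,
    aLoop_eq chars chars.length j (by omega)]
  dsimp only
  exact pair_eq rfl (by ring)
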